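-- pv_equiv track=rewrite | github.com/izikeros/scripts | my_scripts/vtt_filter.py | get_unique_initials
-- ===== SOURCE A (Python) =====
-- def get_unique_initials(name: str, used_initials: set) -> str:
--     words = name.split()
--     initials = ''.join(word[0].upper() for word in words if word)
--
--     if not initials:
--         return name  # Return full name if we can't create initials
--
--     unique_initials = initials
--     i = 1
--     while unique_initials in used_initials:
--         unique_initials = initials + ''.join(word[1:i+1] for word in words if len(word) > i)
--         i += 1
--         if i > max(len(word) for word in words):
--             return name  # Return full name if we can't create unique initials
--
--     used_initials.add(unique_initials)
--     return unique_initials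
-- ===== SOURCE B (Python) =====
-- def get_unique_initials(name: str, used_initials: set) -> str:
--     words = name.split()
--     initials = ''.join(word[0].upper() for word in words if word)
--     if not initials:
--         return name
--
--     if initials not in used_initials:
--         used_initials.add(initials)
--         return initials
--
--     # state: one (accumulated extension, remaining characters) pair per word that
--     # still has characters to contribute; the candidate grows one character per
--     # surviving word each round, and the loop ends when every word is exhausted.
--     state = [(w[1:2], w[2:]) for w in words if len(w) > 1]
--     while state:
--         cand = initials + ''.join(p for p, _ in state)
--         if cand not in used_initials:
--             used_initials.add(cand)
--             return cand
--         state = [(p + r[0], r[1:]) for p, r in state if r]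
--     return name
-- ===== Notes on version B (the rewrite author's own statement) =====
-- stated objective: alternative
-- what changed: A regenerates each candidate from scratch by re-slicing every word (word[1:i+1]) and re-computing max(len(word)...) each iteration of a counter loop; B keeps an incremental worklist of (accumulated extension, remaining chars) pairs, extends each surviving word by one character per round, and terminates when the worklist empties, so it needs no counter and no max-length bound.
import Mathlib
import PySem

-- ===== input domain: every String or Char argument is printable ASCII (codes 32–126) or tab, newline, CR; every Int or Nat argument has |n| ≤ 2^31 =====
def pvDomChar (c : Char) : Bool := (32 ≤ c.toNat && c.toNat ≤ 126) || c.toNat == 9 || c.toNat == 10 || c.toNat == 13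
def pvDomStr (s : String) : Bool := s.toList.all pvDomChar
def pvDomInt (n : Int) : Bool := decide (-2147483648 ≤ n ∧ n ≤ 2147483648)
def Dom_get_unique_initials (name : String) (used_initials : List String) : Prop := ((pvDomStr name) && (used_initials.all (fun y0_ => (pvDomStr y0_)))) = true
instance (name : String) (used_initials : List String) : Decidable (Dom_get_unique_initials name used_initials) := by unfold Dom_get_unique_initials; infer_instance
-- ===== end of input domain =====

-- B replaces A's counter loop (which re-slices every word and recomputes the max word length
-- each iteration) by an incremental worklist of (accumulated extension, remaining chars) pairs
-- that empties itself (objective: alternative). Python A mutates used_initials (set.add on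
-- success); the equivalence proved here is about the RETURN value only (Python B performs the
-- same mutation).

-- ===== PORT A =====
-- shared sub-expression: ''.join(word[1:i+1] for word in words if len(word) > i)
def extChunk (words : List String) (i : Int) : String :=
  PySem.Str.join "" ((words.filter (fun w => decide (i < PySem.Str.len w))).map
    (fun w => PySem.Str.slice w (some 1) (some (i + 1))))

-- word[0].upper(); none is unreachable under the "if word" guard
def headUpper (w : String) : String :=
  match PySem.Str.pyGet? w 0 with
  | some c => String.ofList [PySem.Chars.upperChar c]
  | none => ""

-- the while loop of A: state (unique_initials, i); fuel only makes the recursion total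
-- (the loop runs at most maxlen-1 times, so fuel = maxlen.toNat + 1 is never exhausted)
def guiLoop (name : String) (words : List String) (initials : String)
    (used : List String) (maxlen : Int) : String → Int → Nat → String
  | unique, i, fuel =>
    if PySem.Set.contains used unique then
      match fuel with
      | 0 => name
      | Nat.succ f =>
        let unique' := initials ++ extChunk words i
        if i + 1 > maxlen then name
        else guiLoop name words initials used maxlen unique' (i + 1) f
    else unique

def get_unique_initials (name : String) (used_initials : List String) : String :=
  let words := PySem.Str.split₀ name
  let initials := PySem.Str.join "" ((words.filter (fun w => w ≠ "")).map headUpper)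
  if initials = "" then name
  else
    -- max(len(word) for word in words); getD 0 unreachable: initials ≠ "" forces words ≠ []
    let maxlen := (PySem.List.max? (words.map (fun w => PySem.Str.len w)) (fun x => x)).getD 0
    guiLoop name words initials used_initials maxlen initials 1 (maxlen.toNat + 1)

-- ===== PORT B =====
-- Python strings of B's worklist are handled as their code-point lists (exact; the slices
-- w[1:2], w[2:], r[1:] have nonnegative bounds, so they are take/drop on the list).

-- one round: state = [(p + r[0], r[1:]) for p, r in state if r]
def altStep (s : List (List Char × List Char)) : List (List Char × List Char) :=
  s.filterMap (fun pr => match pr.2 with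
    | [] => none
    | c :: rs => some (pr.1 ++ [c], rs))

-- termination measure for the while loop: each surviving pair loses one remaining char
def altMu (s : List (List Char × List Char)) : Nat := (s.map (fun pr => pr.2.length + 1)).sum

theorem altMu_eq (s : List (List Char × List Char)) :
    altMu s = (s.map (fun pr => pr.2.length)).sum + s.length := by
  induction s with
  | nil => rfl
  | cons pr t ih => simp only [altMu, List.map_cons, List.sum_cons, List.length_cons] at *; omega

-- definitional reductions of one round of altStep
theorem altStep_cons_nil (p : List Char) (t : List (List Char × List Char)) :
    altStep ((p, []) :: t) = altStep t := rfl

theorem altStep_cons_cons (p : List Char) (c : Char) (rs : List Char)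
    (t : List (List Char × List Char)) :
    altStep ((p, c :: rs) :: t) = (p ++ [c], rs) :: altStep t := rfl

theorem altMu_step_le (s : List (List Char × List Char)) :
    altMu (altStep s) ≤ (s.map (fun pr => pr.2.length)).sum := by
  induction s with
  | nil => simp [altStep, altMu]
  | cons pr t ih =>
    obtain ⟨p, r⟩ := pr
    cases r with
    | nil =>
      rw [altStep_cons_nil, List.map_cons, List.sum_cons]
      omega
    | cons c rs =>
      rw [altStep_cons_cons, List.map_cons, List.sum_cons]
      simp only [altMu, List.map_cons, List.sum_cons, List.length_cons] at *
      omega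

theorem altMu_step_lt (pr : List Char × List Char) (t : List (List Char × List Char)) :
    altMu (altStep (pr :: t)) < altMu (pr :: t) := by
  have h1 := altMu_step_le (pr :: t)
  have h2 := altMu_eq (pr :: t)
  simp only [List.length_cons] at h2
  omega

-- the while loop of B, recursion on the shrinking worklist
def guiAltLoop (name initials : String) (used : List String)
    (state : List (List Char × List Char)) : String :=
  match state with
  | [] => name
  | pr :: t =>
    let cand := initials ++ String.ofList (((pr :: t).map Prod.fst).flatten)
    if PySem.Set.contains used cand then
      guiAltLoop name initials used (altStep (pr :: t))
    else cand
termination_by altMu state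
decreasing_by exact altMu_step_lt pr t

def get_unique_initials_alt (name : String) (used_initials : List String) : String :=
  let words := PySem.Str.split₀ name
  let initials := PySem.Str.join "" ((words.filter (fun w => w ≠ "")).map headUpper)
  if initials = "" then name
  else if PySem.Set.contains used_initials initials then
    -- [(w[1:2], w[2:]) for w in words if len(w) > 1]
    guiAltLoop name initials used_initials
      ((words.filter (fun w => decide ((1 : Int) < PySem.Str.len w))).map
        (fun w => (w.toList.tail.take 1, w.toList.tail.drop 1)))
  else initials

-- ===== PRECONDITION & SPEC =====
def Spec_get_unique_initials (name : String) (used_initials : List String) (out : String) : Prop := out = get_unique_initials_alt name used_initials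
instance (name : String) (used_initials : List String) (out : String) : Decidable (Spec_get_unique_initials name used_initials out) := by unfold Spec_get_unique_initials; infer_instance

-- ===== CLAIM (what is proved, stated in full; the proofs are below) =====
def Claim_equal_get_unique_initials : Prop := ∀ (name : String) (used_initials : List String), Dom_get_unique_initials name used_initials → Spec_get_unique_initials name used_initials (get_unique_initials name used_initials)

-- ===== LEMMAS AND PROOFS =====

-- the abstract worklist of B after round i-1 (i ≥ 1): for every word with len > i,
-- the pair (word[1:i+1], word[i+1:]) at the code-point level
def mkState (words : List String) (i : Int) : List (List Char × List Char) :=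
  (words.filter (fun w => decide (i < PySem.Str.len w))).map
    (fun w => (w.toList.tail.take i.toNat, w.toList.tail.drop i.toNat))

theorem strLen_eq (w : String) : PySem.Str.len w = (w.toList.length : Int) := by
  simp [PySem.Str.len]

theorem join_empty_sep (parts : List String) :
    (PySem.Str.join "" parts).toList = (parts.map String.toList).flatten := by
  simp only [PySem.Str.toList_join]
  show [].intercalate (parts.map String.toList) = (parts.map String.toList).flatten
  generalize parts.map String.toList = l
  induction l with
  | nil => rfl
  | cons p t ih =>
    cases t with
    | nil => simp [List.intercalate]
    | cons q u => simp_all [List.intercalate, List.intersperse]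

-- one round of B advances the abstract worklist by one
theorem altStep_mkState (words : List String) (i : Int) (hi : 0 ≤ i) :
    altStep (mkState words i) = mkState words (i + 1) := by
  induction words with
  | nil => rfl
  | cons w ws ih =>
    simp only [mkState, List.filter_cons] at *
    by_cases h1 : i < PySem.Str.len w
    · rw [strLen_eq] at h1
      rw [if_pos (by rw [strLen_eq]; exact decide_eq_true h1)]
      rw [List.map_cons]
      have htl : w.toList.tail.length = w.toList.length - 1 := List.length_tail
      by_cases h2 : i + 1 < (w.toList.length : Int)
      · have hlt : i.toNat < w.toList.tail.length := by omega
        rw [List.drop_eq_getElem_cons hlt, altStep_cons_cons, ih]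
        have htake : w.toList.tail.take i.toNat ++ [w.toList.tail[i.toNat]] =
            w.toList.tail.take (i + 1).toNat := by
          have h3 : (i + 1).toNat = i.toNat + 1 := by omega
          rw [h3, List.take_add_one, List.getElem?_eq_getElem hlt]
          rfl
        have hdrop : w.toList.tail.drop (i.toNat + 1) = w.toList.tail.drop (i + 1).toNat := by
          congr 1; omega
        rw [htake, hdrop, if_pos (by rw [strLen_eq]; exact decide_eq_true h2), List.map_cons]
      · have hdropnil : w.toList.tail.drop i.toNat = [] := by
          apply List.drop_eq_nil_of_le; omega
        rw [hdropnil, altStep_cons_nil, ih,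
          if_neg (by rw [strLen_eq]; simpa using h2)]
    · have h2 : ¬ (i + 1 < PySem.Str.len w) := by rw [strLen_eq] at *; omega
      rw [if_neg (by simpa using h1), if_neg (by simpa using h2)]
      exact ih

-- the candidate B builds from the worklist is A's candidate string initials + extChunk
theorem cand_mkState (initials : String) (words : List String) (i : Int) (hi : 0 ≤ i) :
    initials ++ String.ofList (((mkState words i).map Prod.fst).flatten) =
      initials ++ extChunk words i := by
  congr 1
  apply String.toList_injective
  rw [extChunk, join_empty_sep, String.toList_ofList]
  have hsl : ∀ w : String, (PySem.Str.slice w (some 1) (some (i + 1))).toList =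
      w.toList.tail.take i.toNat := by
    intro w
    have h1 : (PySem.Str.slice w (some 1) (some (i + 1))).toList =
        PySem.List.slice w.toList (some 1) (some (i + 1)) := by
      simp [PySem.Str.toList_slice]
    rw [h1, PySem.List.slice_toNat w.toList (by omega : (0:Int) ≤ 1) (by omega : (0:Int) ≤ i + 1)]
    have h3 : (i + 1).toNat - (1 : Int).toNat = i.toNat := by omega
    have h4 : Int.toNat 1 = 1 := rfl
    rw [h3, h4, List.drop_one]
  rw [mkState, List.map_map, List.map_map]
  congr 1
  apply List.map_congr_left
  intro w _
  exact (hsl w).symm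

-- B's loop from the abstract worklist computes the first unused candidate among
-- initials+extChunk i, …, initials+extChunk (maxlen-1)
theorem guiAltLoop_eq_find (name initials : String) (used : List String)
    (words : List String) (maxlen : Int)
    (hmax : ∀ w ∈ words, PySem.Str.len w ≤ maxlen)
    (hach : ∀ i : Int, i < maxlen → ∃ w ∈ words, i < PySem.Str.len w) :
    ∀ (n : Nat) (i : Int), 1 ≤ i → (maxlen - i).toNat ≤ n →
      guiAltLoop name initials used (mkState words i) =
        (match ((PySem.List.pyRange i maxlen 1).map
            (fun j => initials ++ extChunk words j)).find?
            (fun c => !(PySem.Set.contains used c)) with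
          | some c => c
          | none => name) := by
  intro n
  induction n with
  | zero =>
    intro i hi hn
    have hle : maxlen ≤ i := by omega
    have hnil : mkState words i = [] := by
      rw [mkState, List.filter_eq_nil_iff.mpr, List.map_nil]
      intro w hw
      simp only [decide_eq_true_eq, not_lt]
      exact le_trans (hmax w hw) hle
    rw [hnil, guiAltLoop, PySem.List.pyRange_one_eq_nil hle, List.map_nil, List.find?_nil]
  | succ m ih =>
    intro i hi hn
    by_cases hlt : i < maxlen
    · obtain ⟨w, hw, hwl⟩ := hach i hlt
      have hne : mkState words i ≠ [] := by
        rw [mkState]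
        simp only [ne_eq, List.map_eq_nil_iff, List.filter_eq_nil_iff, not_forall]
        exact ⟨w, hw, by simpa using hwl⟩
      obtain ⟨pr, t, hpt⟩ := List.exists_cons_of_ne_nil hne
      rw [hpt, guiAltLoop, ← hpt]
      have hcand := cand_mkState initials words i (by omega)
      rw [hcand]
      rw [PySem.List.pyRange_one_cons hlt, List.map_cons]
      by_cases hc : PySem.Set.contains used (initials ++ extChunk words i) = true
      · rw [if_pos hc, List.find?_cons_of_neg (by simpa using hc),
          altStep_mkState words i (by omega), ih (i + 1) (by omega) (by omega)]
      · have hcf : PySem.Set.contains used (initials ++ extChunk words i) = false :=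
          Bool.not_eq_true _ ▸ (by simpa using hc)
        rw [if_neg hc, List.find?_cons_of_pos (by simpa using hcf)]
    · have hle : maxlen ≤ i := by omega
      have hnil : mkState words i = [] := by
        rw [mkState, List.filter_eq_nil_iff.mpr, List.map_nil]
        intro w hw
        simp only [decide_eq_true_eq, not_lt]
        exact le_trans (hmax w hw) hle
      rw [hnil, guiAltLoop, PySem.List.pyRange_one_eq_nil hle, List.map_nil, List.find?_nil]

-- the while loop of A scans exactly the candidates  u, initials ++ ext i, …, initials ++ ext (maxlen-1)
theorem guiLoop_eq_find (name : String) (words : List String) (initials : String)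
    (used : List String) (maxlen : Int) :
    ∀ (fuel : Nat) (i : Int) (u : String), (maxlen - i).toNat + 1 ≤ fuel →
      guiLoop name words initials used maxlen u i fuel =
        (match (u :: (PySem.List.pyRange i maxlen 1).map (fun j => initials ++ extChunk words j)).find?
            (fun c => !(PySem.Set.contains used c)) with
          | some c => c
          | none => name) := by
  intro fuel
  induction fuel with
  | zero => intro i u h; omega
  | succ f ih =>
    intro i u h
    rw [guiLoop]
    by_cases hu : PySem.Set.contains used u = true
    · have hpu : (!(PySem.Set.contains used u)) = false := by rw [hu]; rfl
      rw [if_pos hu]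
      simp only [List.find?_cons, hpu]
      by_cases hle : i + 1 > maxlen
      · rw [if_pos hle, PySem.List.pyRange_one_eq_nil (by omega), List.map_nil, List.find?_nil]
      · rw [if_neg hle, PySem.List.pyRange_one_cons (show i < maxlen by omega),
            List.map_cons, List.find?_cons,
            ih (i + 1) (initials ++ extChunk words i) (by omega), List.find?_cons]
    · have hc : PySem.Set.contains used u = false := by
        cases hb : PySem.Set.contains used u
        · rfl
        · exact absurd hb hu
      have hpu : (!(PySem.Set.contains used u)) = true := by rw [hc]; rfl
      rw [if_neg hu]
      simp only [List.find?_cons, hpu]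

-- ===== VERDICT (by name: the statement is the Claim_ definition above) =====
theorem get_unique_initials_spec : Claim_equal_get_unique_initials := by
  intro name used_initials _
  simp only [Spec_get_unique_initials, get_unique_initials, get_unique_initials_alt]
  set words := PySem.Str.split₀ name with hwords
  set initials := PySem.Str.join "" ((words.filter (fun w => w ≠ "")).map headUpper) with hini
  by_cases h0 : initials = ""
  · rw [if_pos h0, if_pos h0]
  · rw [if_neg h0, if_neg h0]
    cases hmx : PySem.List.max? (words.map (fun w => PySem.Str.len w)) (fun x => x) with
    | none =>
      exfalso
      apply h0
      have hnil : words = [] :=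
        List.map_eq_nil_iff.mp ((PySem.List.max?_eq_none_iff _ _).mp hmx)
      rw [hini, hnil]
      rfl
    | some m =>
      have hmax : ∀ w ∈ words, PySem.Str.len w ≤ m := by
        intro w hw
        exact PySem.List.max?_isMax hmx _ (List.mem_map_of_mem hw)
      have hach : ∀ i : Int, i < m → ∃ w ∈ words, i < PySem.Str.len w := by
        intro i hilt
        obtain ⟨w, hw, hwl⟩ := List.mem_map.mp (PySem.List.max?_mem hmx)
        exact ⟨w, hw, by omega⟩
      simp only [Option.getD_some]
      rw [guiLoop_eq_find name words initials used_initials m (m.toNat + 1) 1 initials (by omega)]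
      by_cases hc : PySem.Set.contains used_initials initials = true
      · rw [if_pos hc, List.find?_cons_of_neg (by simpa using hc)]
        have hstate : ((words.filter (fun w => decide ((1 : Int) < PySem.Str.len w))).map
            (fun w => (w.toList.tail.take 1, w.toList.tail.drop 1))) = mkState words 1 := rfl
        rw [hstate, guiAltLoop_eq_find name initials used_initials words m hmax hach
          ((m - 1).toNat) 1 (by omega) (by omega)]
      · have hcf : PySem.Set.contains used_initials initials = false := by
          cases hb : PySem.Set.contains used_initials initials
          · rfl
          · exact absurd hb hc
        rw [if_neg hc, List.find?_cons_of_pos (by simpa using hcf)]
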